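-- pv_equiv track=rewrite | github.com/DoctorLai/ACM | binarysearch/Candy-Race/Candy-Race.py | solve
-- ===== SOURCE A (Python) =====
-- def solve(P):
--     n = len(P)
--     dp = [[0] * n for _ in range(n)]
--     for i in range(n):
--         dp[i][i] = P[i]
--
--     for i in range(n - 2, -1, -1):
--         for j in range(i + 1, n):
--             dp[i][j] = max(P[i] - dp[i + 1][j], P[j] - dp[i][j - 1])
--
--     return dp[0][-1] > 0
-- ===== SOURCE B (Python) =====
-- def solve(P):
--     n = len(P)
--     memo = {}
--
--     def f(i, j):
--         # best score difference the player to move can force on interval [i, j]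
--         if i == j:
--             return P[i]
--         if (i, j) not in memo:
--             memo[(i, j)] = max(P[i] - f(i + 1, j), P[j] - f(i, j - 1))
--         return memo[(i, j)]
--
--     return f(0, n - 1) > 0
-- ===== Notes on version B (the rewrite author's own statement) =====
-- stated objective: alternative
-- what changed: Replaces A's bottom-up n*n table fill with top-down memoized recursion over intervals: a helper f(i,j) with a dict cache computes the same optimal score difference, and the answer is f(0, n-1) > 0; Pre_ excludes the empty list, on which both implementations raise IndexError.
import Mathlib
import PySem

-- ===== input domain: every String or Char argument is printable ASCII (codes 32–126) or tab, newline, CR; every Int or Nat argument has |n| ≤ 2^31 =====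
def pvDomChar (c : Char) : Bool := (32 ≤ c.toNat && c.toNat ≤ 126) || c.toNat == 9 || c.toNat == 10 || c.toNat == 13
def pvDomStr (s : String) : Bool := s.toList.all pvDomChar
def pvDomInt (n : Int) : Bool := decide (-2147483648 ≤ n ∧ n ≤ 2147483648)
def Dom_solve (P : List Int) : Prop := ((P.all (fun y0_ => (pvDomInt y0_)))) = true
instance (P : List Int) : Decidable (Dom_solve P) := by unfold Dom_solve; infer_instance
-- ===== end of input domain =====

-- B replaces A's bottom-up n×n table fill with top-down recursion over intervals
-- (memoized in Python; memoization is a pure cache, so the port is the recursion itself).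

-- ===== PORT A =====
-- literal transliteration of A: build the n×n zero table, set the diagonal,
-- then fill rows i = n-2 … 0, columns j = i+1 … n-1, finally read dp[0][-1].
def solve (P : List Int) : Bool :=
  let n : Int := P.length
  let dp0 : List (List Int) :=
    (PySem.List.pyRange 0 n 1).map (fun _ => List.replicate n.toNat 0)
  let dp1 :=
    (PySem.List.pyRange 0 n 1).foldl (fun dp i =>
      PySem.List.pySetD dp i
        (PySem.List.pySetD (PySem.List.pyGetD dp i []) i (PySem.List.pyGetD P i 0))) dp0
  let dp2 :=
    (PySem.List.pyRange (n - 2) (-1) (-1)).foldl (fun dp i =>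
      (PySem.List.pyRange (i + 1) n 1).foldl (fun dp j =>
        PySem.List.pySetD dp i
          (PySem.List.pySetD (PySem.List.pyGetD dp i []) j
            (max (PySem.List.pyGetD P i 0 -
                    PySem.List.pyGetD (PySem.List.pyGetD dp (i + 1) []) j 0)
                 (PySem.List.pyGetD P j 0 -
                    PySem.List.pyGetD (PySem.List.pyGetD dp i []) (j - 1) 0)))) dp) dp1
  decide (PySem.List.pyGetD (PySem.List.pyGetD dp2 0 []) (-1) 0 > 0)

-- ===== PORT B =====
-- transliteration of Source B's helper f(i, j): the memo dict only caches repeated calls,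
-- so the recursion below is exactly f's computation. Python's f is only ever invoked
-- with i ≤ j on inputs admitted by Pre_ (nonempty P), so the i > j branch is unreachable
-- there; it returns 0 only to make the Lean recursion total.
def fB (P : List Int) (i j : Int) : Int :=
  if i = j then PySem.List.pyGetD P i 0
  else if _h : i < j then
    max (PySem.List.pyGetD P i 0 - fB P (i + 1) j)
        (PySem.List.pyGetD P j 0 - fB P i (j - 1))
  else 0
termination_by (j - i).toNat
decreasing_by all_goals omega

-- return f(0, n - 1) > 0
def solve_alt (P : List Int) : Bool :=
  decide (fB P 0 ((P.length : Int) - 1) > 0)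

-- ===== PRECONDITION & SPEC =====
-- Pre_ excludes only the empty list, on which both A and B raise IndexError.
def Pre_solve (P : List Int) : Prop := P ≠ []
instance (P : List Int) : Decidable (Pre_solve P) := by unfold Pre_solve; infer_instance
def pvWitness_solve : List Int := [3, 1, 2]

def Spec_solve (P : List Int) (out : Bool) : Prop := out = solve_alt P
instance (P : List Int) (out : Bool) : Decidable (Spec_solve P out) := by unfold Spec_solve; infer_instance

-- ===== CLAIM (what is proved, stated in full; the proofs are below) =====
def Claim_equal_solve : Prop := ∀ (P : List Int), Dom_solve P → Pre_solve P → Spec_solve P (solve P)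

-- ===== LEMMAS AND PROOFS =====

def Ent (D : List (List Int)) (r j : Int) : Int :=
  PySem.List.pyGetD (PySem.List.pyGetD D r []) j 0

def Shape (P : List Int) (D : List (List Int)) : Prop :=
  D.length = P.length ∧
  ∀ r : Int, 0 ≤ r → r < (P.length : Int) → (PySem.List.pyGetD D r []).length = P.length

def upd (D : List (List Int)) (i j v : Int) : List (List Int) :=
  PySem.List.pySetD D i (PySem.List.pySetD (PySem.List.pyGetD D i []) j v)

theorem shape_upd {P : List Int} {D : List (List Int)} (hS : Shape P D)
    {i : Int} (hi0 : 0 ≤ i) (hin : i < (P.length : Int)) (j v : Int) :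
    Shape P (upd D i j v) := by
  obtain ⟨hlen, hrow⟩ := hS
  constructor
  · simpa [upd, PySem.List.pySetD_of_nonneg _ _ hi0] using hlen
  · intro r hr0 hrn
    rw [upd, PySem.List.pySetD_of_nonneg _ _ hi0,
        PySem.List.pyGetD_eq_getElem _ _ hr0 (by simpa [hlen]),
        List.getElem_set]
    split
    · rename_i h
      rw [PySem.List.length_pySetD]
      have := hrow i hi0 hin
      have hri : r = i := by omega
      simpa [hri] using this
    · have := hrow r hr0 hrn
      rwa [PySem.List.pyGetD_eq_getElem _ _ hr0 (by simpa [hlen])] at this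

theorem ent_upd {P : List Int} {D : List (List Int)} (hS : Shape P D)
    {i j : Int} (hi0 : 0 ≤ i) (hin : i < (P.length : Int)) (hj0 : 0 ≤ j) (hjn : j < (P.length : Int))
    (v : Int) (r c : Int) (hr0 : 0 ≤ r) (hrn : r < (P.length : Int)) (hc0 : 0 ≤ c) (hcn : c < (P.length : Int)) :
    Ent (upd D i j v) r c = if r = i ∧ c = j then v else Ent D r c := by
  obtain ⟨hlen, hrow⟩ := hS
  rw [Ent, upd, PySem.List.pySetD_of_nonneg _ _ hi0,
      PySem.List.pyGetD_eq_getElem _ _ hr0 (by simpa [hlen]),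
      List.getElem_set]
  split
  · rename_i h
    have hri : r = i := by omega
    rw [PySem.List.pySetD_of_nonneg _ _ hj0,
        PySem.List.pyGetD_eq_getElem _ _ hc0 (by simp [hrow i hi0 hin]; omega),
        List.getElem_set]
    have hrowlen := hrow i hi0 hin
    split
    · rename_i h2
      have : c = j := by omega
      simp [hri, this]
    · have : ¬ (r = i ∧ c = j) := by omega
      rw [if_neg this, Ent, hri,
          PySem.List.pyGetD_eq_getElem _ _ hc0 (by rw [hrowlen]; omega)]
  · rename_i h
    have : ¬ (r = i ∧ c = j) := by omega
    rw [if_neg this, Ent, PySem.List.pyGetD_eq_getElem _ _ hr0 (by simpa [hlen])]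

theorem fB_diag (P : List Int) (i : Int) : fB P i i = PySem.List.pyGetD P i 0 := by
  rw [fB]; simp

def Tab (P : List Int) (lo : Int) (D : List (List Int)) : Prop :=
  Shape P D ∧
  ∀ r c : Int, 0 ≤ r → r < (P.length : Int) → 0 ≤ c → c < (P.length : Int) →
    Ent D r c = if lo ≤ r ∧ r ≤ c then fB P r c
                else if r = c then PySem.List.pyGetD P r 0 else 0

def TabM (P : List Int) (i m : Int) (D : List (List Int)) : Prop :=
  Shape P D ∧
  ∀ r c : Int, 0 ≤ r → r < (P.length : Int) → 0 ≤ c → c < (P.length : Int) →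
    Ent D r c = if (i + 1 ≤ r ∧ r ≤ c) ∨ (r = i ∧ i ≤ c ∧ c < m) then fB P r c
                else if r = c then PySem.List.pyGetD P r 0 else 0

theorem inner_loop (P : List Int) (i : Int) (hi0 : 0 ≤ i) :
    ∀ (m : Int) (D : List (List Int)), i + 1 ≤ m → m ≤ (P.length : Int) → TabM P i m D →
    TabM P i (P.length : Int)
      ((PySem.List.pyRange m (P.length : Int) 1).foldl (fun dp j =>
        PySem.List.pySetD dp i
          (PySem.List.pySetD (PySem.List.pyGetD dp i []) j
            (max (PySem.List.pyGetD P i 0 -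
                    PySem.List.pyGetD (PySem.List.pyGetD dp (i + 1) []) j 0)
                 (PySem.List.pyGetD P j 0 -
                    PySem.List.pyGetD (PySem.List.pyGetD dp i []) (j - 1) 0)))) D) := by
  intro m D him hmn hD
  by_cases hm : m < (P.length : Int)
  · rw [PySem.List.pyRange_one_cons hm, List.foldl_cons]
    have hin : i < (P.length : Int) := by omega
    have hv1 : PySem.List.pyGetD (PySem.List.pyGetD D (i + 1) []) m 0 = fB P (i + 1) m := by
      have := hD.2 (i + 1) m (by omega) (by omega) (by omega) hm
      rw [Ent] at this; rw [this, if_pos (Or.inl ⟨le_refl _, him⟩)]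
    have hv2 : PySem.List.pyGetD (PySem.List.pyGetD D i []) (m - 1) 0 = fB P i (m - 1) := by
      have := hD.2 i (m - 1) hi0 hin (by omega) (by omega)
      rw [Ent] at this; rw [this, if_pos (Or.inr ⟨rfl, by omega, by omega⟩)]
    rw [hv1, hv2]
    have hval : max (PySem.List.pyGetD P i 0 - fB P (i + 1) m)
        (PySem.List.pyGetD P m 0 - fB P i (m - 1)) = fB P i m := by
      conv_rhs => rw [fB]
      rw [if_neg (show ¬ i = m by omega), dif_pos (show i < m by omega)]
    rw [hval]
    have hupd := ent_upd hD.1 hi0 hin (by omega : (0:Int) ≤ m) hm (fB P i m)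
    have hsh := shape_upd hD.1 hi0 hin m (fB P i m)
    simp only [upd] at hupd hsh
    exact inner_loop P i hi0 (m + 1) _ (by omega) (by omega)
      ⟨hsh, by
        intro r c hr0 hrn hc0 hcn
        rw [show Ent _ r c = _ from hupd r c hr0 hrn hc0 hcn]
        by_cases hrc : r = i ∧ c = m
        · rw [if_pos hrc, hrc.1, hrc.2, if_pos (Or.inr ⟨rfl, by omega, by omega⟩)]
        · rw [if_neg hrc, hD.2 r c hr0 hrn hc0 hcn]
          split_ifs <;> first | rfl | omega⟩
  · rw [PySem.List.pyRange_one_eq_nil (by omega), List.foldl_nil]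
    have : m = (P.length : Int) := by omega
    rwa [this] at hD
termination_by m => ((P.length : Int) - m).toNat
decreasing_by omega

theorem TabM_to_Tab (P : List Int) (i : Int) (D : List (List Int))
    (h : TabM P i (P.length : Int) D) : Tab P i D := by
  refine ⟨h.1, ?_⟩
  intro r c hr0 hrn hc0 hcn
  rw [h.2 r c hr0 hrn hc0 hcn]
  split_ifs <;> first | rfl | omega

theorem outer_loop (P : List Int) :
    ∀ (k : Int) (D : List (List Int)), k ≤ (P.length : Int) - 2 → Tab P (k + 1) D →
    Tab P 0 ((PySem.List.pyRange k (-1) (-1)).foldl (fun dp i =>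
      (PySem.List.pyRange (i + 1) (P.length : Int) 1).foldl (fun dp j =>
        PySem.List.pySetD dp i
          (PySem.List.pySetD (PySem.List.pyGetD dp i []) j
            (max (PySem.List.pyGetD P i 0 -
                    PySem.List.pyGetD (PySem.List.pyGetD dp (i + 1) []) j 0)
                 (PySem.List.pyGetD P j 0 -
                    PySem.List.pyGetD (PySem.List.pyGetD dp i []) (j - 1) 0)))) dp) D) := by
  intro k D hk hD
  by_cases hk0 : 0 ≤ k
  · rw [PySem.List.pyRange_neg_one_cons (show (-1:Int) < k by omega), List.foldl_cons]
    have hTM : TabM P k (k + 1) D := by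
      refine ⟨hD.1, ?_⟩
      intro r c hr0 hrn hc0 hcn
      rw [hD.2 r c hr0 hrn hc0 hcn]
      split_ifs <;> first | rfl | omega | (rename_i h; obtain (h | ⟨h1, h2, h3⟩) := h; · omega
                                           · rw [show r = c by omega, fB_diag, show c = r by omega])
    have hres := inner_loop P k hk0 (k + 1) D (by omega) (by omega) hTM
    have hTab := TabM_to_Tab P k _ hres
    exact outer_loop P (k - 1) _ (by omega) (by rwa [show k - 1 + 1 = k by omega])
  · rw [PySem.List.pyRange_neg_one_eq_nil (by omega), List.foldl_nil]
    refine ⟨hD.1, ?_⟩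
    intro r c hr0 hrn hc0 hcn
    rw [hD.2 r c hr0 hrn hc0 hcn]
    split_ifs <;> first | rfl | omega
termination_by k => (k + 1).toNat
decreasing_by omega

theorem dp0_init (P : List Int) :
    Shape P ((PySem.List.pyRange 0 (P.length : Int) 1).map
      (fun _ => List.replicate ((P.length : Int)).toNat 0)) ∧
    ∀ r c : Int, 0 ≤ r → r < (P.length : Int) → 0 ≤ c → c < (P.length : Int) →
      Ent ((PySem.List.pyRange 0 (P.length : Int) 1).map
        (fun _ => List.replicate ((P.length : Int)).toNat 0)) r c = 0 := by
  have hlen : ((PySem.List.pyRange 0 (P.length : Int) 1).map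
      (fun _ => List.replicate ((P.length : Int)).toNat (0:Int))).length = P.length := by
    simp [PySem.List.length_pyRange_one]
  have hrow : ∀ r : Int, 0 ≤ r → r < (P.length : Int) →
      PySem.List.pyGetD ((PySem.List.pyRange 0 (P.length : Int) 1).map
        (fun _ => List.replicate ((P.length : Int)).toNat (0:Int))) r [] =
      List.replicate ((P.length : Int)).toNat (0:Int) := by
    intro r hr0 hrn
    rw [PySem.List.pyGetD_eq_getElem _ _ hr0 (by rw [hlen]; exact hrn), List.getElem_map]
  refine ⟨⟨hlen, fun r hr0 hrn => by rw [hrow r hr0 hrn]; simp⟩, ?_⟩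
  intro r c hr0 hrn hc0 hcn
  rw [Ent, hrow r hr0 hrn,
      PySem.List.pyGetD_eq_getElem _ _ hc0 (by simp; omega), List.getElem_replicate]

theorem diag_loop (P : List Int) :
    ∀ (a : Int) (D : List (List Int)), 0 ≤ a → Shape P D →
    (∀ r c : Int, 0 ≤ r → r < (P.length : Int) → 0 ≤ c → c < (P.length : Int) →
      Ent D r c = if r = c ∧ r < a then PySem.List.pyGetD P r 0 else 0) →
    Shape P ((PySem.List.pyRange a (P.length : Int) 1).foldl (fun dp i =>
        PySem.List.pySetD dp i
          (PySem.List.pySetD (PySem.List.pyGetD dp i []) i (PySem.List.pyGetD P i 0))) D) ∧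
    ∀ r c : Int, 0 ≤ r → r < (P.length : Int) → 0 ≤ c → c < (P.length : Int) →
      Ent ((PySem.List.pyRange a (P.length : Int) 1).foldl (fun dp i =>
        PySem.List.pySetD dp i
          (PySem.List.pySetD (PySem.List.pyGetD dp i []) i (PySem.List.pyGetD P i 0))) D) r c =
      if r = c then PySem.List.pyGetD P r 0 else 0 := by
  intro a D ha0 hS hE
  by_cases han : a < (P.length : Int)
  · rw [PySem.List.pyRange_one_cons han, List.foldl_cons]
    have hupd := ent_upd hS ha0 han ha0 han (PySem.List.pyGetD P a 0)
    have hsh := shape_upd hS ha0 han a (PySem.List.pyGetD P a 0)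
    simp only [upd] at hupd hsh
    refine diag_loop P (a + 1) _ (by omega) hsh ?_
    intro r c hr0 hrn hc0 hcn
    rw [show Ent _ r c = _ from hupd r c hr0 hrn hc0 hcn]
    by_cases hrc : r = a ∧ c = a
    · rw [if_pos hrc, if_pos (by omega), hrc.1]
    · rw [if_neg hrc, hE r c hr0 hrn hc0 hcn]
      split_ifs <;> first | rfl | omega
  · rw [PySem.List.pyRange_one_eq_nil (by omega), List.foldl_nil]
    refine ⟨hS, ?_⟩
    intro r c hr0 hrn hc0 hcn
    rw [hE r c hr0 hrn hc0 hcn]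
    split_ifs <;> first | rfl | omega
termination_by a => ((P.length : Int) - a).toNat
decreasing_by omega

theorem pyGetD_last_eq (xs : List Int) (h : xs ≠ []) :
    PySem.List.pyGetD xs (-1) 0 = PySem.List.pyGetD xs ((xs.length : Int) - 1) 0 := by
  have hpos : 0 < xs.length := List.length_pos_of_ne_nil h
  rw [PySem.List.pyGetD_neg_one _ _ h,
      PySem.List.pyGetD_eq_getElem _ _ (by omega) (by omega),
      List.getLast_eq_getElem]
  simp only [show ((xs.length : Int) - 1).toNat = xs.length - 1 from by omega]

theorem tab_of_diag (P : List Int) (lo : Int) (D : List (List Int)) (hS : Shape P D)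
    (hE : ∀ r c : Int, 0 ≤ r → r < (P.length : Int) → 0 ≤ c → c < (P.length : Int) →
      Ent D r c = if r = c then PySem.List.pyGetD P r 0 else 0)
    (hlo : (P.length : Int) - 1 ≤ lo) : Tab P lo D := by
  refine ⟨hS, ?_⟩
  intro r c hr0 hrn hc0 hcn
  rw [hE r c hr0 hrn hc0 hcn]
  by_cases hcase : lo ≤ r ∧ r ≤ c
  · rw [if_pos hcase, if_pos (show r = c by omega), show c = r by omega, fB_diag]
  · rw [if_neg hcase]

theorem solve_eq (P : List Int) (hP : P ≠ []) : solve P = solve_alt P := by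
  have hn : 0 < P.length := List.length_pos_of_ne_nil hP
  simp only [solve, solve_alt]
  have h0 := dp0_init P
  have h1 := diag_loop P 0 _ le_rfl h0.1 (by
    intro r c hr0 hrn hc0 hcn
    rw [h0.2 r c hr0 hrn hc0 hcn]
    split_ifs <;> first | rfl | omega)
  have hTab1 := tab_of_diag P ((P.length : Int) - 2 + 1) _ h1.1 h1.2 (by omega)
  have hT := outer_loop P ((P.length : Int) - 2) _ le_rfl hTab1
  have hrowlen := hT.1.2 0 le_rfl (by exact_mod_cast hn)
  have hne : PySem.List.pyGetD _ 0 [] ≠ [] :=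
    List.ne_nil_of_length_pos (by rw [hrowlen]; exact hn)
  rw [pyGetD_last_eq _ hne]
  rw [show ((PySem.List.pyGetD _ 0 []).length : Int) = (P.length : Int) from by rw [hrowlen]]
  have hEnt := hT.2 0 ((P.length : Int) - 1) le_rfl (by exact_mod_cast hn) (by omega)
    (by omega)
  rw [if_pos ⟨le_rfl, by omega⟩, Ent] at hEnt
  rw [hEnt]

-- ===== VERDICT (by name: the statement is the Claim_ definition above) =====
theorem solve_spec : Claim_equal_solve := by
  intro P _ hP
  exact solve_eq P hP
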